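-- pv_equiv track=rewrite | github.com/timothy-b/btcrecover | btcrecover/btrcpass/btcrpass.py | expand_mapping_backreference_wildcard
-- ===== SOURCE A (Python) =====
-- def expand_mapping_backreference_wildcard(password_prefix, minlen, maxlen, bpos, bmap):
--     for wildcard_expanded in bmap.get(password_prefix[bpos], (password_prefix[bpos],)):
--         password_prefix_expanded = password_prefix + wildcard_expanded
--         if minlen <= 1:
--             yield password_prefix_expanded
--         if maxlen > 1:
--             for password_expanded in expand_mapping_backreference_wildcard(password_prefix_expanded, minlen-1, maxlen-1, bpos, bmap):
--                 yield password_expanded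
-- ===== SOURCE B (Python) =====
-- def expand_mapping_backreference_wildcard(password_prefix, minlen, maxlen, bpos, bmap):
--     # Iterative DFS with an explicit stack instead of the recursive generator;
--     # pop yields the node, then its children are pushed in reverse so the
--     # recursion's preorder is reproduced exactly.
--     def children(cur):
--         return bmap.get(cur[bpos], (cur[bpos],))
--     stack = [(password_prefix + s, minlen, maxlen) for s in reversed(children(password_prefix))]
--     while stack:
--         cur, ml, mx = stack.pop()
--         if ml <= 1:
--             yield cur
--         if mx > 1:
--             for s in reversed(children(cur)):
--                 stack.append((cur + s, ml - 1, mx - 1))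
-- ===== Notes on version B (the rewrite author's own statement) =====
-- stated objective: alternative
-- what changed: A's recursive generator is replaced by an iterative DFS with an explicit stack: pop a candidate, yield it if its minlen budget allows, and push its children in reverse so the recursion's preorder is reproduced exactly.
import Mathlib
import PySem

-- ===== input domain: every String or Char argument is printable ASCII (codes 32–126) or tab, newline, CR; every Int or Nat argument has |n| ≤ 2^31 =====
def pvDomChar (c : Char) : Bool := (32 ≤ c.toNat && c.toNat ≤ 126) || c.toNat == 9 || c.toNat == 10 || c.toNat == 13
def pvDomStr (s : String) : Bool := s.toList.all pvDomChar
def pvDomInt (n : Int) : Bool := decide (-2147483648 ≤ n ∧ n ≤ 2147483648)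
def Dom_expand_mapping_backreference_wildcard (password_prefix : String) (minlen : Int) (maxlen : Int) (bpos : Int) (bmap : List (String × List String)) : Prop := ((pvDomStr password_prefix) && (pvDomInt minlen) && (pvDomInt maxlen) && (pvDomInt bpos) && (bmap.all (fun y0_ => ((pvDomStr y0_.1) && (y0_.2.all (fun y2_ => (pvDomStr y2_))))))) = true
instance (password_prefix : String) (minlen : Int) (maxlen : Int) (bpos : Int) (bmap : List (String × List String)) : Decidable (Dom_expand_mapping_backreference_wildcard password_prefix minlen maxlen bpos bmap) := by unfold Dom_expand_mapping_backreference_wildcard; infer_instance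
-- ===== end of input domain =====

-- B replaces A's recursive generator by an explicit-stack DFS loop producing the same yields in the same order; objective: alternative decomposition, no speed claim.

-- ===== PORT A =====
-- `bmap.get(cur[bpos], (cur[bpos],))`: first-match lookup of the 1-char string cur[bpos];
-- none from pyGet? is Python's IndexError (excluded by Pre_), mapped to [] here.
def pvChildStrs (bpos : Int) (bmap : List (String × List String)) (cur : String) : List String :=
  match PySem.Str.pyGet? cur bpos with
  | none => []
  | some c =>
    match bmap.lookup (String.ofList [c]) with
    | some v => v
    | none => [String.ofList [c]]

mutual
-- A's recursive generator, as a list-producing function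
def pvGoA (bpos : Int) (bmap : List (String × List String)) (password_prefix : String) (minlen maxlen : Int) : List String :=
  pvLoopA bpos bmap password_prefix minlen maxlen (pvChildStrs bpos bmap password_prefix)
termination_by (maxlen.toNat, 1, 0)

-- A's `for wildcard_expanded in …` loop
def pvLoopA (bpos : Int) (bmap : List (String × List String)) (password_prefix : String) (minlen maxlen : Int) : List String → List String
  | [] => []
  | s :: rest =>
    (if minlen ≤ 1 then [password_prefix ++ s] else []) ++
    (if 1 < maxlen then pvGoA bpos bmap (password_prefix ++ s) (minlen - 1) (maxlen - 1) else []) ++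
    pvLoopA bpos bmap password_prefix minlen maxlen rest
termination_by S => (maxlen.toNat, 0, S.length)
end

def expand_mapping_backreference_wildcard (password_prefix : String) (minlen : Int) (maxlen : Int) (bpos : Int) (bmap : List (String × List String)) : List String :=
  pvGoA bpos bmap password_prefix minlen maxlen

-- ===== PORT B =====
-- pvWt/pvMeasure/pvK exist only as the termination measure of the stack loop
def pvWt (K : Nat) (e : String × Int × Int) : Nat := (K + 1) ^ e.2.2.toNat
def pvMeasure (K : Nat) (st : List (String × Int × Int)) : Nat := (st.map (pvWt K)).sum
def pvK (bmap : List (String × List String)) : Nat := 1 + (bmap.map (fun p => p.2.length)).sum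

theorem pvLookup_len_le (bmap : List (String × List String)) (k : String) (v : List String)
    (hl : bmap.lookup k = some v) : v.length ≤ (bmap.map (fun p => p.2.length)).sum := by
  induction bmap with
  | nil => simp at hl
  | cons p rest ih =>
    rw [List.lookup_cons] at hl
    split at hl
    · cases hl; simp
    · have := ih hl; simp; omega

theorem pvChildStrs_len_le (bpos : Int) (bmap : List (String × List String)) (cur : String) :
    (pvChildStrs bpos bmap cur).length ≤ pvK bmap := by
  unfold pvChildStrs pvK
  cases h : PySem.Str.pyGet? cur bpos with
  | none => simp
  | some c =>
    simp only []
    cases hl : bmap.lookup (String.ofList [c]) with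
    | none => simp
    | some v => have := pvLookup_len_le bmap _ _ hl; simp; omega

theorem pvMeasure_append (K : Nat) (a b : List (String × Int × Int)) :
    pvMeasure K (a ++ b) = pvMeasure K a + pvMeasure K b := by
  simp [pvMeasure]

theorem pvMeasure_map_const (K : Nat) (S : List String) (f : String → String) (ml mx : Int) :
    pvMeasure K (S.map (fun s => (f s, ml, mx))) = S.length * (K + 1) ^ mx.toNat := by
  induction S with
  | nil => simp [pvMeasure]
  | cons a l ih => simp [pvMeasure, pvWt] at ih ⊢; rw [ih]; ring

-- B's `while stack:` loop (Lean list head = top of Python's stack;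
-- Python pushes `reversed(children)` and pops from the end, which is prepending the
-- children in order here)
def pvRunB (bpos : Int) (bmap : List (String × List String)) : List (String × Int × Int) → List String
  | [] => []
  | (cur, ml, mx) :: st =>
    (if ml ≤ 1 then [cur] else []) ++
    pvRunB bpos bmap
      ((if 1 < mx then (pvChildStrs bpos bmap cur).map (fun s => (cur ++ s, ml - 1, mx - 1)) else []) ++ st)
termination_by st => pvMeasure (pvK bmap) st
decreasing_by
  rw [pvMeasure_append]
  have hw : pvMeasure (pvK bmap) ((cur, ml, mx) :: st)
      = (pvK bmap + 1) ^ mx.toNat + pvMeasure (pvK bmap) st := by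
    simp [pvMeasure, pvWt]
  rw [hw]
  by_cases h : 1 < mx
  · rw [dif_pos h, pvMeasure_map_const]
    have hK := pvChildStrs_len_le bpos bmap cur
    have hm : mx.toNat = (mx - 1).toNat + 1 := by omega
    have hpow : 0 < (pvK bmap + 1) ^ (mx - 1).toNat := Nat.pow_pos (by omega)
    have hlt : (pvChildStrs bpos bmap cur).length * (pvK bmap + 1) ^ (mx - 1).toNat
        < (pvK bmap + 1) ^ mx.toNat := by
      rw [hm, pow_succ]
      calc (pvChildStrs bpos bmap cur).length * (pvK bmap + 1) ^ (mx - 1).toNat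
          ≤ pvK bmap * (pvK bmap + 1) ^ (mx - 1).toNat :=
            Nat.mul_le_mul_right _ hK
        _ < (pvK bmap + 1) * (pvK bmap + 1) ^ (mx - 1).toNat :=
            (Nat.mul_lt_mul_right hpow).mpr (by omega)
        _ = (pvK bmap + 1) ^ (mx - 1).toNat * (pvK bmap + 1) := by ring
    omega
  · rw [dif_neg h]
    simp [pvMeasure]

def expand_mapping_backreference_wildcard_alt (password_prefix : String) (minlen : Int) (maxlen : Int) (bpos : Int) (bmap : List (String × List String)) : List String :=
  pvRunB bpos bmap
    ((pvChildStrs bpos bmap password_prefix).map (fun s => (password_prefix ++ s, minlen, maxlen)))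

-- ===== PRECONDITION & SPEC =====
-- Pre_ excludes exactly the inputs where `password_prefix[bpos]` raises IndexError (in A and in B alike).
def Pre_expand_mapping_backreference_wildcard (password_prefix : String) (minlen : Int) (maxlen : Int) (bpos : Int) (bmap : List (String × List String)) : Prop :=
  PySem.Raise.InRange password_prefix.toList.length bpos
instance (password_prefix : String) (minlen : Int) (maxlen : Int) (bpos : Int) (bmap : List (String × List String)) : Decidable (Pre_expand_mapping_backreference_wildcard password_prefix minlen maxlen bpos bmap) := by unfold Pre_expand_mapping_backreference_wildcard; infer_instance

def pvWitness_expand_mapping_backreference_wildcard : String × Int × Int × Int × (List (String × List String)) :=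
  ("ab", 1, 2, 0, [("a", ["x", "y"])])

def Spec_expand_mapping_backreference_wildcard (password_prefix : String) (minlen : Int) (maxlen : Int) (bpos : Int) (bmap : List (String × List String)) (out : List String) : Prop := out = expand_mapping_backreference_wildcard_alt password_prefix minlen maxlen bpos bmap
instance (password_prefix : String) (minlen : Int) (maxlen : Int) (bpos : Int) (bmap : List (String × List String)) (out : List String) : Decidable (Spec_expand_mapping_backreference_wildcard password_prefix minlen maxlen bpos bmap out) := by unfold Spec_expand_mapping_backreference_wildcard; infer_instance

-- ===== CLAIM (what is proved, stated in full; the proofs are below) =====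
def Claim_equal_expand_mapping_backreference_wildcard : Prop := ∀ (password_prefix : String) (minlen : Int) (maxlen : Int) (bpos : Int) (bmap : List (String × List String)), Dom_expand_mapping_backreference_wildcard password_prefix minlen maxlen bpos bmap → Pre_expand_mapping_backreference_wildcard password_prefix minlen maxlen bpos bmap → Spec_expand_mapping_backreference_wildcard password_prefix minlen maxlen bpos bmap (expand_mapping_backreference_wildcard password_prefix minlen maxlen bpos bmap)

-- ===== LEMMAS AND PROOFS =====

-- semantics of one stack node: its own yield plus (via pvGoA) its whole subtree
def pvNodeSem (bpos : Int) (bmap : List (String × List String)) (e : String × Int × Int) : List String :=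
  (if e.2.1 ≤ 1 then [e.1] else []) ++
  (if 1 < e.2.2 then pvGoA bpos bmap e.1 (e.2.1 - 1) (e.2.2 - 1) else [])

theorem pvLoopA_eq (bpos : Int) (bmap : List (String × List String)) (p : String) (ml mx : Int) (S : List String) :
    pvLoopA bpos bmap p ml mx S = (S.map (fun s => pvNodeSem bpos bmap (p ++ s, ml, mx))).flatten := by
  induction S with
  | nil => simp [pvLoopA]
  | cons s rest ih =>
    rw [pvLoopA, ih]
    simp [pvNodeSem]

theorem pvGoA_eq (bpos : Int) (bmap : List (String × List String)) (p : String) (ml mx : Int) :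
    pvGoA bpos bmap p ml mx = ((pvChildStrs bpos bmap p).map (fun s => pvNodeSem bpos bmap (p ++ s, ml, mx))).flatten := by
  rw [pvGoA, pvLoopA_eq]

theorem pvRunB_eq (bpos : Int) (bmap : List (String × List String)) (st : List (String × Int × Int)) :
    pvRunB bpos bmap st = (st.map (pvNodeSem bpos bmap)).flatten := by
  fun_induction pvRunB bpos bmap st with
  | case1 => rfl
  | case2 cur ml mx st ih =>
    simp only [dite_eq_ite] at ih
    rw [ih]
    by_cases h : 1 < mx
    · rw [if_pos h]
      simp only [List.map_append, List.map_map, List.flatten_append, Function.comp_def]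
      rw [← pvGoA_eq]
      simp [pvNodeSem, h]
    · simp [pvNodeSem, h]

-- ===== VERDICT (by name: the statement is the Claim_ definition above) =====
theorem expand_mapping_backreference_wildcard_spec : Claim_equal_expand_mapping_backreference_wildcard := by
  intro p ml mx bpos bmap _ _
  unfold Spec_expand_mapping_backreference_wildcard
  unfold expand_mapping_backreference_wildcard expand_mapping_backreference_wildcard_alt
  rw [pvGoA_eq, pvRunB_eq, List.map_map]
  rfl
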